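-- pv_equiv track=rewrite | github.com/cutehammond772/problem-solving-archive | 백준/Gold/30414. 투스타 춘배/투스타 춘배.py | solve
-- ===== SOURCE A (Python) =====
-- def solve(P, A, B, G):
--   # 현재 노드에서 흙의 양이 (-)이면 돈이 필요하고, (+)이면 흙이 남는다는 의미다.
--   # 자식 노드에서 흙이 (-)일 경우 남는 흙이 있으면 보충하고, 아니면 합산한다.
--   def work(prev, node):
--     dirt = A[node] - B[node]
--
--     for next in G[node]:
--       if prev == next:
--         continue
--
--       dirt += min(0, work(node, next))
--
--     return dirt
--
--   return max(0, -work(0, P))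
-- ===== SOURCE B (Python) =====
-- def solve(P, A, B, G):
--   # Iterative post-order traversal with an explicit stack of
--   # (prev, node, accumulated dirt, remaining children) frames.
--   stack = [(0, P, A[P] - B[P], G[P])]
--   while True:
--     prev, node, acc, rest = stack.pop()
--     if rest:
--       nxt = rest[0]
--       stack.append((prev, node, acc, rest[1:]))
--       if nxt != prev:
--         stack.append((node, nxt, A[nxt] - B[nxt], G[nxt]))
--     else:
--       if not stack:
--         return max(0, -acc)
--       p2, n2, a2, r2 = stack.pop()
--       stack.append((p2, n2, a2 + min(0, acc), r2))
-- ===== Notes on version B (the rewrite author's own statement) =====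
-- stated objective: alternative
-- what changed: Replaces the recursive post-order DFS by an iterative while-loop over an explicit stack of (prev, node, accumulator, remaining-children) frames; no call recursion is used, so deep trees cannot hit Python's recursion limit.
import Mathlib
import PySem

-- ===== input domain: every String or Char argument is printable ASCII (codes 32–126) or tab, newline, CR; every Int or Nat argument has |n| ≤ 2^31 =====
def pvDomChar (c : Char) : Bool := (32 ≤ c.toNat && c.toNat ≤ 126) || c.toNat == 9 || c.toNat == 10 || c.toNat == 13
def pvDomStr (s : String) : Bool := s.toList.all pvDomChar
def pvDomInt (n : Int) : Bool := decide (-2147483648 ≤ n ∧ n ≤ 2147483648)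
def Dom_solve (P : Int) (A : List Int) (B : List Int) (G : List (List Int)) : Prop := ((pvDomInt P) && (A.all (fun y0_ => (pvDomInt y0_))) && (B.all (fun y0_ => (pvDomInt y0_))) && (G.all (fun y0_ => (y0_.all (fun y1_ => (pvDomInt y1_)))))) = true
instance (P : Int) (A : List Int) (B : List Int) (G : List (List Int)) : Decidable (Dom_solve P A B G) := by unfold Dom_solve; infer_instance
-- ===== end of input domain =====

-- B replaces A's recursive post-order tree walk by an explicit iterative stack of
-- (prev, node, accumulator, remaining-children) frames (objective: alternative, and
-- immune to Python's recursion limit on deep trees).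

-- ===== PORT A =====
-- traversal states are pairs (prev, node); pvSucc lists the states A's recursion
-- steps into from a state (used by the ports only as a fuel/termination bound)
def pvSucc (G : List (List Int)) (s : Int × Int) : List (Int × Int) :=
  ((PySem.List.pyGet? G s.2).getD []).filterMap
    (fun c => if c = s.1 then none else some (s.2, c))

-- worklist closure of pvSucc from (0, P); acc is the discovered list.  Its value is
-- never trusted by a proof: Pre_solve itself re-checks closedness pointwise.
def pvReachAux (G : List (List Int)) : Nat → List (Int × Int) → List (Int × Int) → List (Int × Int)
  | 0, acc, _ => acc
  | _ + 1, acc, [] => acc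
  | fuel + 1, acc, s :: todo =>
    let ns := ((pvSucc G s).filter (fun c => decide (c ∉ acc))).dedup
    pvReachAux G fuel (acc ++ ns) (todo ++ ns)

def pvReach (P : Int) (G : List (List Int)) : List (Int × Int) :=
  pvReachAux G ((G.flatten.length + 1) * (G.flatten.length + 1) + 2) [(0, P)] [(0, P)]

-- A's inner recursion `work(prev, node)`, fuelled (none = fuel out or IndexError;
-- inside Pre_solve the chosen fuel is proved sufficient)
def workA (A B : List Int) (G : List (List Int)) : Nat → Int → Int → Option Int
  | 0, _, _ => none
  | fuel + 1, prev, node =>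
    match PySem.List.pyGet? A node, PySem.List.pyGet? B node, PySem.List.pyGet? G node with
    | some a, some b, some gl =>
      gl.foldl
        (fun acc nxt =>
          match acc with
          | none => none
          | some d =>
            if nxt = prev then some d
            else
              match workA A B G fuel node nxt with
              | none => none
              | some w => some (d + min 0 w))
        (some (a - b))
    | _, _, _ => none

def solve (P : Int) (A : List Int) (B : List Int) (G : List (List Int)) : Int :=
  match workA A B G ((pvReach P G).length + 2) 0 P with
  | some w => max 0 (-w)
  | none => 0

-- ===== PORT B =====
-- one frame = (prev, node, accumulated dirt, remaining children); one execB step =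
-- one iteration of Source B's while-loop (none = fuel out or IndexError)
def execB (A B : List Int) (G : List (List Int)) : Nat → List (Int × Int × Int × List Int) → Option Int
  | 0, _ => none
  | _ + 1, [] => none
  | fuel + 1, (prev, node, acc, rest) :: st =>
    match rest with
    | nxt :: rest' =>
      if nxt = prev then execB A B G fuel ((prev, node, acc, rest') :: st)
      else
        match PySem.List.pyGet? A nxt, PySem.List.pyGet? B nxt, PySem.List.pyGet? G nxt with
        | some a, some b, some gl =>
          execB A B G fuel ((node, nxt, a - b, gl) :: (prev, node, acc, rest') :: st)
        | _, _, _ => none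
    | [] =>
      match st with
      | [] => some (max 0 (-acc))
      | (p2, n2, a2, r2) :: st' => execB A B G fuel ((p2, n2, a2 + min 0 acc, r2) :: st')

-- iterative-deepening fuel for the unbounded while-loop (a totality device only)
def goB (A B : List Int) (G : List (List Int)) (init : List (Int × Int × Int × List Int)) : Nat → Nat → Int
  | 0, _ => 0
  | k + 1, f =>
    match execB A B G f init with
    | some r => r
    | none => goB A B G init k (2 * f)

def solve_alt (P : Int) (A : List Int) (B : List Int) (G : List (List Int)) : Int :=
  match PySem.List.pyGet? A P, PySem.List.pyGet? B P, PySem.List.pyGet? G P with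
  | some a, some b, some gl =>
    goB A B G [(0, P, a - b, gl)]
      (((pvReach P G).length + 2) * (Nat.log2 (2 * G.flatten.length + 4) + 2) + 1) 1
  | _, _, _ => 0

-- ===== PRECONDITION & SPEC =====
def pvOk (A B : List Int) (G : List (List Int)) (v : Int) : Bool :=
  (PySem.List.pyGet? A v).isSome && (PySem.List.pyGet? B v).isSome && (PySem.List.pyGet? G v).isSome

-- Bellman-style iterated height table over the discovered states (its meaning is
-- irrelevant to Pre_solve's truth: Pre_solve checks the strict decrease it needs)
def pvHTab (G : List (List Int)) (R : List (Int × Int)) : Nat → List ((Int × Int) × Nat)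
  | 0 => R.map (fun s => (s, 0))
  | i + 1 =>
    let t := pvHTab G R i
    R.map (fun s => (s, (pvSucc G s).foldl (fun a c => max a ((List.lookup c t).getD 0 + 1)) 0))

def pvH (P : Int) (G : List (List Int)) (s : Int × Int) : Nat :=
  (List.lookup s (pvHTab G (pvReach P G) (pvReach P G).length)).getD 0

-- Pre_solve holds exactly when the Python A returns normally: every node the
-- traversal can reach is a valid (possibly negative) index into A, B and G, and the
-- traversal relation pvSucc of the input graph is acyclic on the reachable states
-- (witnessed by the strictly decreasing height pvH), so A's recursion neither raises
-- IndexError nor descends forever.  The condition itself is pointwise and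
-- closed-form — (0,P) discovered, discovered states valid and closed under pvSucc,
-- heights strictly decreasing across every pvSucc edge; pvReach/pvHTab only
-- enumerate the input graph's states to quantify over, and nothing about how they
-- are computed is trusted by the proofs.
def Pre_solve (P : Int) (A : List Int) (B : List Int) (G : List (List Int)) : Prop :=
  (0, P) ∈ pvReach P G ∧
    ∀ s ∈ pvReach P G, pvOk A B G s.2 = true ∧
      ∀ c ∈ pvSucc G s, c ∈ pvReach P G ∧ pvH P G c < pvH P G s

instance (P : Int) (A : List Int) (B : List Int) (G : List (List Int)) : Decidable (Pre_solve P A B G) := by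
  unfold Pre_solve; infer_instance

def pvWitness_solve : Int × List Int × List Int × List (List Int) :=
  (1, [0, 5, 3], [0, 7, 4], [[], [2], [1]])

def Spec_solve (P : Int) (A : List Int) (B : List Int) (G : List (List Int)) (out : Int) : Prop := out = solve_alt P A B G
instance (P : Int) (A : List Int) (B : List Int) (G : List (List Int)) (out : Int) : Decidable (Spec_solve P A B G out) := by unfold Spec_solve; infer_instance

-- ===== CLAIM (what is proved, stated in full; the proofs are below) =====
def Claim_equal_solve : Prop := ∀ (P : Int) (A : List Int) (B : List Int) (G : List (List Int)), Dom_solve P A B G → Pre_solve P A B G → Spec_solve P A B G (solve P A B G)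

-- ===== LEMMAS AND PROOFS =====

-- the per-state value A's recursion computes, read off at a provably sufficient fuel
def pvVal (P : Int) (A B : List Int) (G : List (List Int)) (p v : Int) : Int :=
  (workA A B G ((pvReach P G).length + 1) p v).getD 0

def pvSum (P : Int) (A B : List Int) (G : List (List Int)) (p v : Int) (l : List Int) : Int :=
  l.foldl (fun d c => if c = p then d else d + min 0 (pvVal P A B G v c)) 0

theorem pv_lookup_mem {k : Int × Int} {v : Nat} :
    ∀ {l : List ((Int × Int) × Nat)}, List.lookup k l = some v → (k, v) ∈ l := by
  intro l
  induction l with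
  | nil => intro h; simp [List.lookup] at h
  | cons a l ih =>
    intro h
    rw [List.lookup] at h
    by_cases hk : k == a.1
    · have hk' : k = a.1 := eq_of_beq hk
      simp [hk] at h
      obtain ⟨a1, a2⟩ := a
      simp at hk'
      subst hk'
      subst h
      exact List.mem_cons_self
    · simp [hk] at h
      right
      exact ih h

theorem pv_len_le_flatten {gl : List Int} :
    ∀ {G : List (List Int)}, gl ∈ G → gl.length ≤ G.flatten.length := by
  intro G
  induction G with
  | nil => intro h; simp at h
  | cons g G ih =>
    intro h
    rcases List.mem_cons.mp h with h | h
    · subst h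
      simp [List.flatten_cons]
    · simp only [List.flatten_cons, List.length_append]
      have := ih h
      omega

-- every value in the height table at iteration i is ≤ i
theorem pvHTab_le (G : List (List Int)) (R : List (Int × Int)) :
    ∀ i s hv, (s, hv) ∈ pvHTab G R i → hv ≤ i := by
  intro i
  induction i with
  | zero =>
    intro s hv h
    simp only [pvHTab, List.mem_map] at h
    obtain ⟨x, -, hx⟩ := h
    have : hv = 0 := (Prod.mk.injEq _ _ _ _ ▸ hx).2.symm ▸ rfl
    omega
  | succ i ih =>
    intro s hv h
    simp only [pvHTab, List.mem_map] at h
    obtain ⟨x, -, hx⟩ := h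
    have hfold : ∀ (l : List (Int × Int)) (a : Nat), a ≤ i + 1 →
        l.foldl (fun a c => max a ((List.lookup c (pvHTab G R i)).getD 0 + 1)) a ≤ i + 1 := by
      intro l
      induction l with
      | nil => intro a ha; simpa using ha
      | cons c l ihl =>
        intro a ha
        simp only [List.foldl_cons]
        apply ihl
        have hl : (List.lookup c (pvHTab G R i)).getD 0 ≤ i := by
          cases hc : List.lookup c (pvHTab G R i) with
          | none => simp
          | some w => simpa using ih c w (pv_lookup_mem hc)
        omega
    have := hfold (pvSucc G x) 0 (by omega)
    have h2 : hv = (pvSucc G x).foldl (fun a c => max a ((List.lookup c (pvHTab G R i)).getD 0 + 1)) 0 := by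
      cases hx; rfl
    omega

theorem pvH_le (P : Int) (G : List (List Int)) (s : Int × Int) :
    pvH P G s ≤ (pvReach P G).length := by
  unfold pvH
  cases hc : List.lookup s (pvHTab G (pvReach P G) (pvReach P G).length) with
  | none => simp
  | some w => simpa using pvHTab_le G (pvReach P G) (pvReach P G).length s w (pv_lookup_mem hc)

-- pvSum's foldl started anywhere
theorem pvSum_foldl (P : Int) (A B : List Int) (G : List (List Int)) (p v : Int) :
    ∀ (l : List Int) (x : Int),
      l.foldl (fun d c => if c = p then d else d + min 0 (pvVal P A B G v c)) x
        = x + pvSum P A B G p v l := by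
  intro l
  induction l with
  | nil => intro x; simp [pvSum]
  | cons c l ih =>
    intro x
    have h2 : pvSum P A B G p v (c :: l)
        = (if c = p then (0:Int) else 0 + min 0 (pvVal P A B G v c)) + pvSum P A B G p v l := by
      rw [pvSum, List.foldl_cons, ih]
    rw [List.foldl_cons, ih, h2]
    by_cases hc : c = p
    · simp [hc]
    · simp only [if_neg hc]
      ring

-- pvSum peels its first element
theorem pvSum_cons (P : Int) (A B : List Int) (G : List (List Int)) (p v c : Int) (l : List Int) :
    pvSum P A B G p v (c :: l)
      = (if c = p then 0 else min 0 (pvVal P A B G v c)) + pvSum P A B G p v l := by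
  by_cases hc : c = p
  · rw [pvSum, List.foldl_cons, if_pos hc, if_pos hc, zero_add]
    rfl
  · rw [pvSum, List.foldl_cons, if_neg hc, if_neg hc, pvSum_foldl, zero_add]

-- workA's characterisation on reachable states, any fuel above the height
theorem workA_eq (P : Int) (A B : List Int) (G : List (List Int))
    (hR : ∀ s ∈ pvReach P G, pvOk A B G s.2 = true ∧
      ∀ c ∈ pvSucc G s, c ∈ pvReach P G ∧ pvH P G c < pvH P G s) :
    ∀ n p v, (p, v) ∈ pvReach P G → pvH P G (p, v) ≤ n → ∀ f, pvH P G (p, v) ≤ f →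
      workA A B G (f + 1) p v
        = some (((PySem.List.pyGet? A v).getD 0 - (PySem.List.pyGet? B v).getD 0)
            + pvSum P A B G p v ((PySem.List.pyGet? G v).getD [])) := by
  intro n
  induction n using Nat.strong_induction_on with
  | _ n ih =>
    intro p v hmem hn f hf
    obtain ⟨hok, hsucc⟩ := hR (p, v) hmem
    simp only [pvOk, Bool.and_eq_true, Option.isSome_iff_exists] at hok
    obtain ⟨⟨⟨a, hA⟩, b, hB⟩, gl, hG⟩ := hok
    have hchild : ∀ c ∈ gl, c ≠ p → (v, c) ∈ pvReach P G ∧ pvH P G (v, c) < pvH P G (p, v) := by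
      intro c hc hcp
      apply hsucc
      simp only [pvSucc, hG, Option.getD_some, List.mem_filterMap]
      exact ⟨c, hc, by simp [hcp]⟩
    have hwc : ∀ c ∈ gl, c ≠ p →
        (workA A B G f v c = some (pvVal P A B G v c)) := by
      intro c hc hcp
      obtain ⟨hcR, hclt⟩ := hchild c hc hcp
      have hlt : pvH P G (v, c) < n := lt_of_lt_of_le hclt hn
      cases f with
      | zero => omega
      | succ f' =>
        have h1 := ih (pvH P G (v, c)) hlt v c hcR (le_refl _) f' (by omega)
        have h2 := ih (pvH P G (v, c)) hlt v c hcR (le_refl _) (pvReach P G).length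
          (pvH_le P G (v, c))
        rw [h1]
        unfold pvVal
        rw [h2]
        simp
    have haux : ∀ l, (∀ c ∈ l, c ≠ p → workA A B G f v c = some (pvVal P A B G v c)) →
        ∀ d : Int,
        l.foldl
          (fun acc nxt =>
            match acc with
            | none => none
            | some d =>
              if nxt = p then some d
              else
                match workA A B G f v nxt with
                | none => none
                | some w => some (d + min 0 w))
          (some d) = some (d + pvSum P A B G p v l) := by
      intro l
      induction l with
      | nil => intro _ d; simp [pvSum]
      | cons c l ihl =>
        intro hl d
        rw [List.foldl_cons]
        by_cases hc : c = p
        · subst hc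
          simp only [reduceIte]
          rw [ihl (fun c hc h => hl c (List.mem_cons_of_mem _ hc) h) d,
            pvSum_cons, if_pos rfl, zero_add]
        · simp only [if_neg hc]
          rw [hl c List.mem_cons_self hc]
          rw [ihl (fun c hc h => hl c (List.mem_cons_of_mem _ hc) h) (d + min 0 (pvVal P A B G v c)),
            pvSum_cons, if_neg hc]
          congr 1
          ring
    simp only [workA, hA, hB, hG]
    exact (haux gl (fun c hc h => hwc c hc h) (a - b)).trans (by simp)

theorem execB_mono (A B : List Int) (G : List (List Int)) :
    ∀ f st r, execB A B G f st = some r → execB A B G (f + 1) st = some r := by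
  intro f
  induction f with
  | zero => intro st r h; simp [execB] at h
  | succ f ih =>
    intro st r h
    match st with
    | [] => simp [execB] at h
    | (prev, node, acc, nxt :: rest') :: st =>
      simp only [execB] at h ⊢
      by_cases hc : nxt = prev
      · simp only [if_pos hc] at h ⊢
        exact ih _ _ h
      · simp only [if_neg hc] at h ⊢
        cases hA : PySem.List.pyGet? A nxt <;> cases hB : PySem.List.pyGet? B nxt <;>
          cases hG : PySem.List.pyGet? G nxt <;> simp only [hA, hB, hG] at h ⊢ <;>
          first
            | exact ih _ _ h
            | simp at h
    | (prev, node, acc, []) :: [] =>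
      simpa [execB] using h
    | (prev, node, acc, []) :: (p2, n2, a2, r2) :: st' =>
      simp only [execB] at h ⊢
      exact ih _ _ h

theorem execB_mono_le (A B : List Int) (G : List (List Int)) (f f' : Nat) (h : f ≤ f')
    (st : List (Int × Int × Int × List Int)) (r : Int) (he : execB A B G f st = some r) :
    execB A B G f' st = some r := by
  induction h with
  | refl => exact he
  | @step m h ih => exact execB_mono A B G m st r ih

-- the machine fully evaluates the top frame and folds its result into pvSum
theorem execB_run (P : Int) (A B : List Int) (G : List (List Int))
    (hR : ∀ s ∈ pvReach P G, pvOk A B G s.2 = true ∧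
      ∀ c ∈ pvSucc G s, c ∈ pvReach P G ∧ pvH P G c < pvH P G s) :
    ∀ n p v, (p, v) ∈ pvReach P G → pvH P G (p, v) ≤ n →
      ∀ cs, (∀ c ∈ cs, c ≠ p → (v, c) ∈ pvReach P G ∧ pvH P G (v, c) < pvH P G (p, v)) →
      ∀ f d st r,
        execB A B G f ((p, v, d + pvSum P A B G p v cs, []) :: st) = some r →
        execB A B G (f + 2 * cs.length * (2 * G.flatten.length + 4) ^ (pvH P G (p, v)))
          ((p, v, d, cs) :: st) = some r := by
  intro n
  induction n using Nat.strong_induction_on with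
  | _ n ih =>
    intro p v hmem hn cs
    induction cs with
    | nil =>
      intro _ f d st r hexec
      simpa [pvSum] using hexec
    | cons c cs ihc =>
      intro hcs f d st r hexec
      have hQ1 : 1 ≤ (2 * G.flatten.length + 4) ^ pvH P G (p, v) :=
        Nat.one_le_pow _ _ (by omega)
      have hsplit : 2 * (c :: cs).length * (2 * G.flatten.length + 4) ^ pvH P G (p, v)
          = 2 * cs.length * (2 * G.flatten.length + 4) ^ pvH P G (p, v)
            + 2 * (2 * G.flatten.length + 4) ^ pvH P G (p, v) := by
        simp [List.length_cons]; ring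
      by_cases hc : c = p
      · rw [pvSum_cons, if_pos hc, zero_add] at hexec
        have h1 := ihc (fun c' hc' h => hcs c' (List.mem_cons_of_mem _ hc') h) f d st r hexec
        have h2 := execB_mono_le A B G _
          (f + 2 * cs.length * (2 * G.flatten.length + 4) ^ pvH P G (p, v)
            + (2 * (2 * G.flatten.length + 4) ^ pvH P G (p, v) - 1))
          (by omega) _ _ h1
        have h3 : execB A B G
            (f + 2 * cs.length * (2 * G.flatten.length + 4) ^ pvH P G (p, v)
              + (2 * (2 * G.flatten.length + 4) ^ pvH P G (p, v) - 1) + 1)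
            ((p, v, d, c :: cs) :: st)
            = execB A B G
              (f + 2 * cs.length * (2 * G.flatten.length + 4) ^ pvH P G (p, v)
                + (2 * (2 * G.flatten.length + 4) ^ pvH P G (p, v) - 1))
              ((p, v, d, cs) :: st) := by
          simp [execB, hc]
        rw [hsplit]
        have harith :
            f + (2 * cs.length * (2 * G.flatten.length + 4) ^ pvH P G (p, v)
              + 2 * (2 * G.flatten.length + 4) ^ pvH P G (p, v))
            = f + 2 * cs.length * (2 * G.flatten.length + 4) ^ pvH P G (p, v)
              + (2 * (2 * G.flatten.length + 4) ^ pvH P G (p, v) - 1) + 1 := by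
          omega
        rw [← Nat.add_assoc, Nat.add_assoc, harith, h3]
        exact h2
      · obtain ⟨hcR, hclt⟩ := hcs c List.mem_cons_self hc
        obtain ⟨hokc, hsuccc⟩ := hR (v, c) hcR
        simp only [pvOk, Bool.and_eq_true, Option.isSome_iff_exists] at hokc
        obtain ⟨⟨⟨ac, hAc⟩, bc, hBc⟩, glc, hGc⟩ := hokc
        have hchild' : ∀ c' ∈ glc, c' ≠ v →
            (c, c') ∈ pvReach P G ∧ pvH P G (c, c') < pvH P G (v, c) := by
          intro c' hc' hcv
          apply hsuccc
          simp only [pvSucc, hGc, Option.getD_some, List.mem_filterMap]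
          exact ⟨c', hc', by simp [hcv]⟩
        have hval : pvVal P A B G v c = ac - bc + pvSum P A B G v c glc := by
          have h2 := workA_eq P A B G hR (pvH P G (v, c)) v c hcR (le_refl _)
            (pvReach P G).length (pvH_le P G (v, c))
          unfold pvVal
          rw [h2]
          simp [hAc, hBc, hGc]
        -- rebracket the accumulator in hexec
        rw [pvSum_cons, if_neg hc] at hexec
        have hexec' : execB A B G f
            ((p, v, d + min 0 (pvVal P A B G v c) + pvSum P A B G p v cs, []) :: st)
            = some r := by
          rw [add_assoc]; exact hexec
        have h1 := ihc (fun c' hc' h => hcs c' (List.mem_cons_of_mem _ hc') h) f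
          (d + min 0 (pvVal P A B G v c)) st r hexec'
        -- pop step: finished child frame folds into the parent frame
        have h2 : execB A B G
            (f + 2 * cs.length * (2 * G.flatten.length + 4) ^ pvH P G (p, v) + 1)
            ((v, c, pvVal P A B G v c, []) :: (p, v, d, cs) :: st) = some r := by
          simp only [execB]
          exact h1
        -- child frame fully evaluated by the outer induction hypothesis
        have h3 := ih (pvH P G (v, c)) (lt_of_lt_of_le hclt hn) v c hcR (le_refl _)
          glc hchild'
          (f + 2 * cs.length * (2 * G.flatten.length + 4) ^ pvH P G (p, v) + 1)
          (ac - bc) ((p, v, d, cs) :: st) r (by rw [← hval]; exact h2)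
        -- push step
        have h4 : execB A B G
            (f + 2 * cs.length * (2 * G.flatten.length + 4) ^ pvH P G (p, v) + 1
              + 2 * glc.length * (2 * G.flatten.length + 4) ^ pvH P G (v, c) + 1)
            ((p, v, d, c :: cs) :: st) = some r := by
          simp only [execB, if_neg hc, hAc, hBc, hGc]
          exact h3
        -- enough fuel: 2 + 2·|glc|·Q^(h child) ≤ 2·Q^(h parent)
        have hgl : glc.length ≤ G.flatten.length :=
          pv_len_le_flatten (PySem.List.mem_of_pyGet?_eq_some G hGc)
        have hQc1 : 1 ≤ (2 * G.flatten.length + 4) ^ pvH P G (v, c) :=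
          Nat.one_le_pow _ _ (by omega)
        have hpow : (2 * G.flatten.length + 4) ^ pvH P G (v, c) * (2 * G.flatten.length + 4)
            ≤ (2 * G.flatten.length + 4) ^ pvH P G (p, v) := by
          have : (2 * G.flatten.length + 4) ^ (pvH P G (v, c) + 1)
              ≤ (2 * G.flatten.length + 4) ^ pvH P G (p, v) :=
            Nat.pow_le_pow_right (by omega) (by omega)
          simpa [pow_succ] using this
        have hmul : 2 * glc.length * (2 * G.flatten.length + 4) ^ pvH P G (v, c)
            ≤ 2 * G.flatten.length * (2 * G.flatten.length + 4) ^ pvH P G (v, c) :=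
          Nat.mul_le_mul_right _ (by omega)
        have hbound : 2 + 2 * glc.length * (2 * G.flatten.length + 4) ^ pvH P G (v, c)
            ≤ 2 * (2 * G.flatten.length + 4) ^ pvH P G (p, v) := by
          have hx : 2 * G.flatten.length * (2 * G.flatten.length + 4) ^ pvH P G (v, c) + 2
              ≤ (2 * G.flatten.length + 4) ^ pvH P G (v, c) * (2 * G.flatten.length + 4) := by
            have := hQc1
            nlinarith
          omega
        rw [hsplit]
        apply execB_mono_le A B G
          (f + 2 * cs.length * (2 * G.flatten.length + 4) ^ pvH P G (p, v) + 1
            + 2 * glc.length * (2 * G.flatten.length + 4) ^ pvH P G (v, c) + 1)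
          _ (by omega) _ _ h4

theorem goB_finds (A B : List Int) (G : List (List Int)) (init : List (Int × Int × Int × List Int)) :
    ∀ k f F r, 1 ≤ f → execB A B G F init = some r → F ≤ f * 2 ^ k →
      goB A B G init (k + 1) f = r := by
  intro k
  induction k with
  | zero =>
    intro f F r hf he hle
    have hx : execB A B G f init = some r :=
      execB_mono_le A B G F f (by simpa using hle) init r he
    simp [goB, hx]
  | succ k ih =>
    intro f F r hf he hle
    cases hx : execB A B G f init with
    | some x =>
      have h1 := execB_mono_le A B G f (max f F) (le_max_left _ _) init x hx
      have h2 := execB_mono_le A B G F (max f F) (le_max_right _ _) init r he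
      rw [h1] at h2
      simp only [goB, hx]
      exact (Option.some.injEq _ _ ▸ h2)
    | none =>
      simp only [goB, hx]
      apply ih (2 * f) F r (by omega) he
      calc F ≤ f * 2 ^ (k + 1) := hle
        _ = 2 * f * 2 ^ k := by ring

-- ===== VERDICT (by name: the statement is the Claim_ definition above) =====
theorem solve_spec : Claim_equal_solve := by
  intro P A B G _ hpre
  obtain ⟨hmem, hR⟩ := hpre
  obtain ⟨hok0, hsucc0⟩ := hR (0, P) hmem
  simp only [pvOk, Bool.and_eq_true, Option.isSome_iff_exists] at hok0
  obtain ⟨⟨⟨a, hA⟩, b, hB⟩, gl, hG⟩ := hok0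
  have hcs : ∀ c ∈ gl, c ≠ 0 → (P, c) ∈ pvReach P G ∧ pvH P G (P, c) < pvH P G (0, P) := by
    intro c hc hc0
    apply hsucc0
    simp only [pvSucc, hG, Option.getD_some, List.mem_filterMap]
    exact ⟨c, hc, by simp [hc0]⟩
  have hwa := workA_eq P A B G hR (pvH P G (0, P)) 0 P hmem (le_refl _)
    ((pvReach P G).length + 1) (by have := pvH_le P G (0, P); omega)
  have hsolve : solve P A B G = max 0 (-(a - b + pvSum P A B G 0 P gl)) := by
    unfold solve
    rw [show (pvReach P G).length + 2 = (pvReach P G).length + 1 + 1 from rfl, hwa]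
    simp [hA, hB, hG]
  have hexec1 : execB A B G 1 [(0, P, a - b + pvSum P A B G 0 P gl, [])]
      = some (max 0 (-(a - b + pvSum P A B G 0 P gl))) := by
    simp [execB]
  have hrun := execB_run P A B G hR (pvH P G (0, P)) 0 P hmem (le_refl _) gl hcs
    1 (a - b) [] _ hexec1
  have hgl : gl.length ≤ G.flatten.length :=
    pv_len_le_flatten (PySem.List.mem_of_pyGet?_eq_some G hG)
  have hF : 1 + 2 * gl.length * (2 * G.flatten.length + 4) ^ pvH P G (0, P)
      ≤ 1 * 2 ^ (((pvReach P G).length + 2) * (Nat.log2 (2 * G.flatten.length + 4) + 2)) := by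
    have hQ1 : 1 ≤ (2 * G.flatten.length + 4) ^ (pvReach P G).length :=
      Nat.one_le_pow _ _ (by omega)
    have hp1 : (2 * G.flatten.length + 4) ^ pvH P G (0, P)
        ≤ (2 * G.flatten.length + 4) ^ (pvReach P G).length :=
      Nat.pow_le_pow_right (by omega) (pvH_le P G (0, P))
    have hs1 : 2 * gl.length * (2 * G.flatten.length + 4) ^ pvH P G (0, P)
        ≤ 2 * G.flatten.length * (2 * G.flatten.length + 4) ^ (pvReach P G).length :=
      Nat.mul_le_mul (by omega) hp1
    have hs2 : 1 + 2 * G.flatten.length * (2 * G.flatten.length + 4) ^ (pvReach P G).length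
        ≤ (2 * G.flatten.length + 4) ^ ((pvReach P G).length + 2) := by
      have : (2 * G.flatten.length + 4) ^ ((pvReach P G).length + 2)
          = (2 * G.flatten.length + 4) ^ (pvReach P G).length
            * ((2 * G.flatten.length + 4) * (2 * G.flatten.length + 4)) := by
        ring
      rw [this]
      have e1 : (2 * G.flatten.length + 4) ^ (pvReach P G).length * (2 * G.flatten.length + 1)
          = 2 * G.flatten.length * (2 * G.flatten.length + 4) ^ (pvReach P G).length
            + (2 * G.flatten.length + 4) ^ (pvReach P G).length := by ring
      have e2 : 2 * G.flatten.length + 1 ≤ (2 * G.flatten.length + 4) * (2 * G.flatten.length + 4) :=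
        le_trans (by omega) (Nat.le_mul_of_pos_left _ (by omega))
      have e3 := Nat.mul_le_mul_left
        ((2 * G.flatten.length + 4) ^ (pvReach P G).length) e2
      omega
    have hs3 : (2 * G.flatten.length + 4) ^ ((pvReach P G).length + 2)
        ≤ (2 ^ (Nat.log2 (2 * G.flatten.length + 4) + 2)) ^ ((pvReach P G).length + 2) := by
      apply Nat.pow_le_pow_left
      have h := Nat.lt_log2_self (n := 2 * G.flatten.length + 4)
      calc 2 * G.flatten.length + 4
          ≤ 2 ^ (Nat.log2 (2 * G.flatten.length + 4) + 1) := by omega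
        _ ≤ 2 ^ (Nat.log2 (2 * G.flatten.length + 4) + 2) :=
            Nat.pow_le_pow_right (by omega) (by omega)
    have hs4 : (2 ^ (Nat.log2 (2 * G.flatten.length + 4) + 2)) ^ ((pvReach P G).length + 2)
        = 2 ^ (((pvReach P G).length + 2) * (Nat.log2 (2 * G.flatten.length + 4) + 2)) := by
      rw [← pow_mul, Nat.mul_comm]
    omega
  have hgo := goB_finds A B G [(0, P, a - b, gl)]
    (((pvReach P G).length + 2) * (Nat.log2 (2 * G.flatten.length + 4) + 2)) 1 _ _
    (le_refl 1) hrun hF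
  have halt : solve_alt P A B G
      = goB A B G [(0, P, a - b, gl)]
          ((((pvReach P G).length + 2) * (Nat.log2 (2 * G.flatten.length + 4) + 2)) + 1) 1 := by
    unfold solve_alt
    simp [hA, hB, hG]
  simp only [Spec_solve]
  rw [hsolve, halt, hgo]
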